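-- pv_equiv track=rewrite | github.com/peter-lang/aoc | 2022/25.py | dec2snafu
-- ===== SOURCE A (Python) =====
-- encode = ["0", "1", "2", "=", "-"]
--
-- def dec2snafu(d: int) -> str:
--     result = []
--     while d > 0:
--         v = d % 5
--         result.append(encode[v])
--         d //= 5
--         if v > 2:
--             d += 1
--     return "".join(reversed(result))
-- ===== SOURCE B (Python) =====
-- def dec2snafu(d: int) -> str:
--     # Pass 1: plain base-5 digits, least significant first, no carry logic.
--     digits = []
--     while d > 0:
--         digits.append(d % 5)
--         d //= 5
--     # Pass 2: thread a carry over the digit list, mapping each adjusted digit to its SNAFU char.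
--     chars = []
--     carry = 0
--     for v in digits:
--         v += carry
--         if v > 2:
--             v -= 5
--             carry = 1
--         else:
--             carry = 0
--         chars.append("012=-"[v])  # v in -2..2; negative index picks '=' or '-'
--     if carry:
--         chars.append("1")
--     return "".join(reversed(chars))
-- ===== Notes on version B (the rewrite author's own statement) =====
-- stated objective: alternative
-- what changed: A's single loop fuses the carry into the running quotient (d //= 5; d += 1 when the digit exceeds 2); B instead makes two distinct passes: first the plain base-5 digit list with no carry logic, then a separate carry-threading pass that maps each adjusted digit to its SNAFU char via negative string indexing and may append a final leading '1'.
import Mathlib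
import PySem

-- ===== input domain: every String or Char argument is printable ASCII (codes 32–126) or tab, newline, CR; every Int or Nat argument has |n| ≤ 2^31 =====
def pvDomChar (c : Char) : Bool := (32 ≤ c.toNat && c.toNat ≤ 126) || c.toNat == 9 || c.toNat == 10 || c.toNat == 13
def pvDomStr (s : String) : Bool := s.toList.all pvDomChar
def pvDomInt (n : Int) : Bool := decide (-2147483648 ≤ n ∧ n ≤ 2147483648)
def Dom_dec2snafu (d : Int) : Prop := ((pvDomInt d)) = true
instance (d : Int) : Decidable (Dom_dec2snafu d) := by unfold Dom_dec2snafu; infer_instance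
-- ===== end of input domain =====

-- B replaces A's single carry-fused loop by two passes (plain base-5 digits, then a carry pass
-- mapping digits to SNAFU chars); objective: alternative decomposition, same cost.

-- ===== PORT A =====
def snafuEncode : List String := ["0", "1", "2", "=", "-"]

-- the while loop of A: state (d, result); each step appends encode[d % 5] and updates d
def snafuLoop (d : Int) (result : List String) : List String :=
  if 0 < d then
    snafuLoop
      (if 2 < PySem.Int.mod d 5 then PySem.Int.floordiv d 5 + 1 else PySem.Int.floordiv d 5)
      (result ++ [(PySem.List.pyGet? snafuEncode (PySem.Int.mod d 5)).getD ""])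
  else result
termination_by d.toNat
decreasing_by
  have h1 : PySem.Int.mod d 5 = d % 5 := PySem.Int.mod_eq_emod_of_pos (by norm_num)
  have h2 : PySem.Int.floordiv d 5 = d / 5 := PySem.Int.floordiv_eq_ediv_of_pos (by norm_num)
  split <;> omega

def dec2snafu (d : Int) : String := PySem.Str.join "" (snafuLoop d []).reverse

-- ===== PORT B =====
-- pass 1 of B: the plain base-5 digit list of d, least significant first, no carry logic
def base5digits (d : Int) : List Int :=
  if 0 < d then PySem.Int.mod d 5 :: base5digits (PySem.Int.floordiv d 5) else []
termination_by d.toNat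
decreasing_by
  have h2 : PySem.Int.floordiv d 5 = d / 5 := PySem.Int.floordiv_eq_ediv_of_pos (by norm_num)
  omega

-- pass 2 of B: thread a carry over the digits; "012=-"[v] for v in -2..2 (negative index)
def carrySnafu : List Int → Int → List String
  | [], carry => if carry ≠ 0 then ["1"] else []
  | v :: rest, carry =>
      ((PySem.Str.pyGet? "012=-" (if 2 < v + carry then v + carry - 5 else v + carry)).map
        (fun c => String.ofList [c])).getD "" ::
      carrySnafu rest (if 2 < v + carry then 1 else 0)

def dec2snafu_alt (d : Int) : String :=
  PySem.Str.join "" (carrySnafu (base5digits d) 0).reverse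

-- ===== PRECONDITION & SPEC =====
def Spec_dec2snafu (d : Int) (out : String) : Prop := out = dec2snafu_alt d
instance (d : Int) (out : String) : Decidable (Spec_dec2snafu d out) := by unfold Spec_dec2snafu; infer_instance

-- ===== CLAIM (what is proved, stated in full; the proofs are below) =====
def Claim_equal_dec2snafu : Prop := ∀ (d : Int), Dom_dec2snafu d → Spec_dec2snafu d (dec2snafu d)

-- ===== LEMMAS AND PROOFS =====

-- A's table lookup equals B's string lookup (with B's carry-adjusted, possibly negative, index)
lemma charMap (m : Int) (h0 : 0 ≤ m) (h5 : m < 5) :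
    (PySem.List.pyGet? snafuEncode m).getD "" =
    ((PySem.Str.pyGet? "012=-" (if 2 < m then m - 5 else m)).map
      (fun c => String.ofList [c])).getD "" := by
  interval_cases m <;> decide

lemma loop_zero (carry : Int) (acc : List String) (hc : carry = 0 ∨ carry = 1) :
    snafuLoop carry acc = acc ++ carrySnafu [] carry := by
  rcases hc with h | h <;> subst h
  · rw [snafuLoop.eq_def]
    simp [carrySnafu]
  · rw [snafuLoop.eq_def, if_pos (by norm_num : (0:Int) < 1),
        show PySem.Int.mod 1 5 = 1 from by decide,
        show PySem.Int.floordiv 1 5 = 0 from by decide,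
        if_neg (by norm_num : ¬ (2:Int) < 1),
        show (PySem.List.pyGet? snafuEncode 1).getD "" = "1" from by decide,
        snafuLoop.eq_def]
    simp [carrySnafu]

lemma loop_step (q r carry : Int) (acc : List String)
    (_hq : 0 ≤ q) (hr0 : 0 ≤ r) (hr5 : r < 5) (hc : carry = 0 ∨ carry = 1)
    (hpos : 0 < 5 * q + r)
    (IH : ∀ (c : Int) (acc : List String), c = 0 ∨ c = 1 →
        snafuLoop (q + c) acc = acc ++ carrySnafu (base5digits q) c) :
    snafuLoop (5 * q + r + carry) acc = acc ++ carrySnafu (r :: base5digits q) carry := by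
  have hd : 0 < 5 * q + r + carry := by omega
  have hm : PySem.Int.mod (5 * q + r + carry) 5 = if r + carry = 5 then 0 else r + carry := by
    rw [PySem.Int.mod_eq_emod_of_pos (by norm_num)]
    split_ifs <;> omega
  have hf : PySem.Int.floordiv (5 * q + r + carry) 5 = if r + carry = 5 then q + 1 else q := by
    rw [PySem.Int.floordiv_eq_ediv_of_pos (by norm_num)]
    split_ifs <;> omega
  rcases (by omega : r + carry = 5 ∨ (2 < r + carry ∧ r + carry < 5) ∨ r + carry ≤ 2)
    with h | h | h
  · -- digit + carry overflows to 5: A's division absorbs it, B emits 0 with carry 1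
    have hm' : PySem.Int.mod (5 * q + r + carry) 5 = 0 := by rw [hm, if_pos h]
    have hf' : PySem.Int.floordiv (5 * q + r + carry) 5 = q + 1 := by rw [hf, if_pos h]
    rw [snafuLoop.eq_def, if_pos hd, hm', hf']
    simp only [carrySnafu]
    rw [if_neg (by norm_num : ¬ (2:Int) < 0), h]
    norm_num
    rw [show (Option.map (fun c => String.ofList [c])
          (PySem.List.pyGet? "012=-".toList 0)).getD "" = "0" from by decide,
        show (PySem.List.pyGet? snafuEncode 0).getD "" = "0" from by decide,
        IH 1 (acc ++ ["0"]) (Or.inr rfl)]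
    simp
  · -- digit + carry in {3,4}: both sides carry; chars agree via charMap
    have hm' : PySem.Int.mod (5 * q + r + carry) 5 = r + carry := by rw [hm, if_neg (by omega)]
    have hf' : PySem.Int.floordiv (5 * q + r + carry) 5 = q := by rw [hf, if_neg (by omega)]
    rw [snafuLoop.eq_def, if_pos hd, hm', hf', if_pos h.1]
    simp only [carrySnafu]
    rw [charMap (r + carry) (by omega) h.2, if_pos h.1, if_pos h.1, IH 1 _ (Or.inr rfl)]
    simp
  · -- digit + carry ≤ 2: no carry on either side
    have hm' : PySem.Int.mod (5 * q + r + carry) 5 = r + carry := by rw [hm, if_neg (by omega)]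
    have hf' : PySem.Int.floordiv (5 * q + r + carry) 5 = q := by rw [hf, if_neg (by omega)]
    rw [snafuLoop.eq_def, if_pos hd, hm', hf', if_neg (by omega : ¬ 2 < r + carry)]
    simp only [carrySnafu]
    rw [charMap (r + carry) (by omega) (by omega), if_neg (by omega : ¬ 2 < r + carry),
        if_neg (by omega : ¬ 2 < r + carry)]
    have := IH 0 (acc ++ [((PySem.Str.pyGet? "012=-" (r + carry)).map
      (fun c => String.ofList [c])).getD ""]) (Or.inl rfl)
    rw [add_zero] at this
    rw [this]
    simp

lemma loop_eq (n : Nat) : ∀ (d carry : Int) (acc : List String),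
    d.toNat ≤ n → 0 ≤ d → (carry = 0 ∨ carry = 1) →
    snafuLoop (d + carry) acc = acc ++ carrySnafu (base5digits d) carry := by
  induction n with
  | zero =>
    intro d carry acc hn hd hc
    have h0 : d = 0 := by omega
    subst h0
    rw [base5digits.eq_def]
    simp only [lt_irrefl, zero_add]
    exact loop_zero carry acc hc
  | succ n ih =>
    intro d carry acc hn hd hc
    by_cases hpos : 0 < d
    · have hm : PySem.Int.mod d 5 = d % 5 := PySem.Int.mod_eq_emod_of_pos (by norm_num)
      have hf : PySem.Int.floordiv d 5 = d / 5 := PySem.Int.floordiv_eq_ediv_of_pos (by norm_num)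
      have hd5 : d = 5 * (d / 5) + d % 5 := by omega
      rw [base5digits.eq_def, if_pos hpos, hm, hf]
      have step := loop_step (d / 5) (d % 5) carry acc (by omega) (by omega) (by omega) hc
        (by omega)
        (fun c acc hc' => ih (d / 5) c acc (by omega) (by omega) hc')
      calc snafuLoop (d + carry) acc
          = snafuLoop (5 * (d / 5) + d % 5 + carry) acc := by rw [← hd5]
        _ = acc ++ carrySnafu (d % 5 :: base5digits (d / 5)) carry := step
    · have h0 : d = 0 := by omega
      subst h0
      rw [base5digits]
      simp only [lt_irrefl, zero_add]
      exact loop_zero carry acc hc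

-- ===== VERDICT (by name: the statement is the Claim_ definition above) =====
theorem dec2snafu_spec : Claim_equal_dec2snafu := by
  intro d _
  unfold Spec_dec2snafu dec2snafu dec2snafu_alt
  by_cases hd : 0 ≤ d
  · have := loop_eq d.toNat d 0 [] (by omega) hd (Or.inl rfl)
    simp only [add_zero, List.nil_append] at this
    rw [this]
  · rw [snafuLoop.eq_def, base5digits.eq_def, if_neg (by omega : ¬ (0:Int) < d),
        if_neg (by omega : ¬ (0:Int) < d)]
    simp [carrySnafu]
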